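-- pv_equiv track=rewrite | github.com/sanikachogale1804/CRM_Python | main.py | _has_permission_in_keys
-- ===== SOURCE A (Python) =====
-- from typing import Optional, List, Dict, Any
--
-- def _has_permission_in_keys(permission: str, permission_keys: List[str]) -> bool:
--     """Check hierarchical permission matches including parents/children"""
--     if not permission:
--         return True
--     if not permission_keys:
--         return False
--
--     if permission in permission_keys:
--         return True
--
--     # Allow if any parent of the requested permission is granted
--     parts = permission.split('.')
--     for i in range(len(parts), 0, -1):
--         candidate = '.'.join(parts[:i])
--         if candidate in permission_keys:
--             return True
--
--     # Allow if any child of the requested permission is granted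
--     prefix = f"{permission}."
--     return any(key.startswith(prefix) for key in permission_keys)
-- ===== SOURCE B (Python) =====
-- from typing import List
--
-- def _has_permission_in_keys(permission: str, permission_keys: List[str]) -> bool:
--     """Check hierarchical permission matches including parents/children"""
--     if not permission:
--         return True
--     m = len(permission)
--     for key in permission_keys:
--         k = len(key)
--         if k == m:
--             if key == permission:
--                 return True
--         elif k < m:
--             # key is an ancestor of permission (prefix ending at a dot boundary)
--             if permission[k] == '.' and permission.startswith(key):
--                 return True
--         else:
--             # key is a descendant of permission
--             if key[m] == '.' and key.startswith(permission):
--                 return True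
--     return False
-- ===== Notes on version B (the rewrite author's own statement) =====
-- stated objective: alternative
-- what changed: Replaces the membership test plus the descending parent-candidate loop (split on '.', join each prefix, list membership) and the separate child scan with a single pass that classifies each key by length as equal, ancestor (boundary char '.' then prefix test) or descendant.
import Mathlib
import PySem

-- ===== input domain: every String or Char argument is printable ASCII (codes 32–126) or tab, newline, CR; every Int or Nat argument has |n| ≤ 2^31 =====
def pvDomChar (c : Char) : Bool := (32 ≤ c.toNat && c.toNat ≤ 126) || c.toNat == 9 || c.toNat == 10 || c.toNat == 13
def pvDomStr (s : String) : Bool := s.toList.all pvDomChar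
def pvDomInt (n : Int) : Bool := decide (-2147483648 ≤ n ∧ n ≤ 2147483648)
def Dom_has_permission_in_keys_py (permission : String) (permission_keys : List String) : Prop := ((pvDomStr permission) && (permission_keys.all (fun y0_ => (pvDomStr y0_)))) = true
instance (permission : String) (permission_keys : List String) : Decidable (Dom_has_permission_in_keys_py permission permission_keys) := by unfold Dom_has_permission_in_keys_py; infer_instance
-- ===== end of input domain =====

-- B replaces A's membership test + descending parent-candidate loop + separate child scan
-- with a single pass that classifies each key by length as equal / ancestor / descendant (objective: alternative decomposition).

-- ===== PORT A =====
def has_permission_in_keys_py (permission : String) (permission_keys : List String) : Bool :=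
  if permission = "" then true
  else if permission_keys = [] then false
  else if permission_keys.contains permission then true
  else
    let parts := PySem.Chars.splitOn permission.toList ['.']
    -- for i in range(len(parts), 0, -1): 'if candidate in permission_keys: return True' → any over the range
    if (PySem.List.pyRange (parts.length : Int) 0 (-1)).any (fun i =>
        permission_keys.contains (String.ofList (PySem.Chars.join ['.'] (PySem.List.slice parts none (some i))))) then
      true
    else
      permission_keys.any (fun key => PySem.Str.startswith key (permission ++ "."))

-- ===== PORT B =====
-- per-key classification: equal / ancestor (boundary char then prefix) / descendant
def pvAltBody (permission : String) (m : Int) (key : String) : Bool :=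
  let k := PySem.Str.len key
  if k = m then key == permission
  else if k < m then
    (PySem.Str.pyGet? permission k == some '.') && PySem.Str.startswith permission key
  else
    (PySem.Str.pyGet? key m == some '.') && PySem.Str.startswith key permission

-- the 'for key in permission_keys: … return True … / return False' loop
def pvAltGo (permission : String) (m : Int) : List String → Bool
  | [] => false
  | key :: rest =>
    if pvAltBody permission m key then true else pvAltGo permission m rest

def has_permission_in_keys_py_alt (permission : String) (permission_keys : List String) : Bool :=
  if permission = "" then true
  else pvAltGo permission (PySem.Str.len permission) permission_keys

-- ===== PRECONDITION & SPEC =====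
def Spec_has_permission_in_keys_py (permission : String) (permission_keys : List String) (out : Bool) : Prop := out = has_permission_in_keys_py_alt permission permission_keys
instance (permission : String) (permission_keys : List String) (out : Bool) : Decidable (Spec_has_permission_in_keys_py permission permission_keys out) := by unfold Spec_has_permission_in_keys_py; infer_instance

-- ===== CLAIM (what is proved, stated in full; the proofs are below) =====
def Claim_equal_has_permission_in_keys_py : Prop := ∀ (permission : String) (permission_keys : List String), Dom_has_permission_in_keys_py permission permission_keys → Spec_has_permission_in_keys_py permission permission_keys (has_permission_in_keys_py permission permission_keys)

-- ===== LEMMAS AND PROOFS =====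

-- A reference recursion computing Python's str.split('.') directly on the char list:
-- `mySplit pre l` is split('.') of (pre ++ l) where pre is the (dot-free) part accumulated so far.
def mySplit (pre : List Char) : List Char → List (List Char)
  | [] => [pre]
  | c :: rest => if c = '.' then pre :: mySplit [] rest else mySplit (pre ++ [c]) rest

theorem splitOn_go_eq (fuel : Nat) : ∀ (l cur : List Char) (acc : List (List Char)),
    l.length ≤ fuel →
    PySem.Chars.splitOn.go ['.'] fuel l cur acc = acc.reverse ++ mySplit cur.reverse l := by
  induction fuel with
  | zero =>
    intro l cur acc h
    have : l = [] := by cases l <;> simp_all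
    subst this
    rw [PySem.Chars.splitOn.go]; simp [mySplit]
  | succ n ih =>
    intro l cur acc h
    cases l with
    | nil => rw [PySem.Chars.splitOn.go] <;> simp [mySplit]
    | cons c rest =>
      rw [PySem.Chars.splitOn.go]
      by_cases hc : c = '.'
      · subst hc
        have hpre : ['.'].isPrefixOf ('.' :: rest) = true := by simp [List.isPrefixOf]
        simp only [hpre, if_pos]
        rw [ih _ _ _ (by simpa using Nat.le_of_succ_le_succ h)]
        simp [mySplit]
      · have hpre : ['.'].isPrefixOf (c :: rest) = false := by
          simp only [List.isPrefixOf, Bool.and_eq_false_iff, beq_eq_false_iff_ne, ne_eq]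
          exact Or.inl fun h => hc h.symm
        simp only [hpre, Bool.false_eq_true, if_false]
        rw [ih _ _ _ (by simpa using Nat.le_of_succ_le_succ h)]
        simp [mySplit, hc]

theorem splitOn_eq_mySplit (l : List Char) : PySem.Chars.splitOn l ['.'] = mySplit [] l := by
  unfold PySem.Chars.splitOn
  rw [splitOn_go_eq _ _ _ _ (Nat.le_succ _)]
  simp

theorem mySplit_ne_nil (pre l : List Char) : mySplit pre l ≠ [] := by
  induction l generalizing pre with
  | nil => simp [mySplit]
  | cons c rest ih => by_cases hc : c = '.' <;> simp [mySplit, hc, ih]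

theorem join_mySplit (l : List Char) : ∀ pre, PySem.Chars.join ['.'] (mySplit pre l) = pre ++ l := by
  induction l with
  | nil => intro pre; simp [mySplit, PySem.Chars.join_singleton]
  | cons c rest ih =>
    intro pre
    by_cases hc : c = '.'
    · subst hc
      obtain ⟨q, qs, hqs⟩ : ∃ q qs, mySplit ([] : List Char) rest = q :: qs := by
        cases h : mySplit ([] : List Char) rest with
        | nil => exact absurd h (mySplit_ne_nil _ _)
        | cons q qs => exact ⟨q, qs, rfl⟩
      have hstep : mySplit pre ('.' :: rest) = pre :: q :: qs := by
        simp [mySplit, hqs]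
      rw [hstep, PySem.Chars.join_cons_cons, ← hqs, ih]
      simp
    · have hstep : mySplit pre (c :: rest) = mySplit (pre ++ [c]) rest := by
        simp [mySplit, hc]
      rw [hstep, ih]; simp

theorem mySplit_append (a : List Char) : ∀ (pre b : List Char),
    mySplit pre (a ++ '.' :: b) = mySplit pre a ++ mySplit [] b := by
  induction a with
  | nil => intro pre b; simp [mySplit]
  | cons c rest ih =>
    intro pre b
    by_cases hc : c = '.'
    · subst hc; simp [mySplit, ih]
    · simp [mySplit, hc, ih]

theorem mySplit_length_pos (pre l : List Char) : 1 ≤ (mySplit pre l).length := by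
  cases h : mySplit pre l with
  | nil => exact absurd h (mySplit_ne_nil _ _)
  | cons _ _ => simp

theorem mem_pyRange_down (n : Nat) (i : Int) :
    i ∈ PySem.List.pyRange (n : Int) 0 (-1) ↔ 1 ≤ i ∧ i ≤ (n : Int) := by
  unfold PySem.List.pyRange
  simp only [if_neg (by norm_num : ¬ ((-1 : Int) = 0))]
  norm_num
  constructor
  · rintro ⟨k, hk, rfl⟩
    split_ifs at hk with h1 <;> omega
  · rintro ⟨h1, h2⟩
    refine ⟨(n - i).toNat, ?_, by omega⟩
    split_ifs with h1' <;> omega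

-- join of a proper nonempty prefix of parts, followed by '.', is a prefix of the full join
theorem join_take_prefix (ps : List (List Char)) : ∀ i, 1 ≤ i → i < ps.length →
    PySem.Chars.join ['.'] (ps.take i) ++ ['.'] <+: PySem.Chars.join ['.'] ps := by
  induction ps with
  | nil => intro i h1 h2; simp at h2
  | cons q qs ih =>
    intro i h1 h2
    cases qs with
    | nil => simp at h2; omega
    | cons r rs =>
      rcases Nat.lt_or_ge i 2 with hi | hi
      · have : i = 1 := by omega
        subst this
        simp only [List.take_succ_cons, List.take_zero]
        rw [PySem.Chars.join_singleton, PySem.Chars.join_cons_cons]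
        exact ⟨PySem.Chars.join ['.'] (r :: rs), by simp⟩
      · obtain ⟨j, rfl⟩ : ∃ j, i = j + 1 := ⟨i - 1, by omega⟩
        have hj1 : 1 ≤ j := by omega
        have hj2 : j < (r :: rs).length := by simpa using h2
        simp only [List.take_succ_cons]
        obtain ⟨t, ts, hts⟩ : ∃ t ts, (r :: rs).take j = t :: ts := by
          cases h : (r :: rs).take j with
          | nil => exfalso; have := congrArg List.length h; simp at this; omega
          | cons t ts => exact ⟨t, ts, rfl⟩
        rw [hts, PySem.Chars.join_cons_cons, ← hts, PySem.Chars.join_cons_cons]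
        obtain ⟨suf, hsuf⟩ := ih j hj1 hj2
        exact ⟨suf, by simp [← hsuf]⟩

-- the candidates A's loop enumerates are exactly: the permission itself, and its dot-ancestors
theorem candidate_char (l k : List Char) :
    (∃ i : Int, i ∈ PySem.List.pyRange ((mySplit [] l).length : Int) 0 (-1) ∧
        k = PySem.Chars.join ['.'] (PySem.List.slice (mySplit [] l) none (some i)))
      ↔ (k = l ∨ k ++ ['.'] <+: l) := by
  constructor
  · rintro ⟨i, hi, rfl⟩
    rw [mem_pyRange_down] at hi
    obtain ⟨h1, h2⟩ := hi
    rw [PySem.List.slice_to _ (by omega)]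
    rcases eq_or_lt_of_le h2 with heq | hlt
    · left
      have : i.toNat = (mySplit [] l).length := by omega
      rw [this, List.take_length]
      simpa using join_mySplit l []
    · right
      have h1' : 1 ≤ i.toNat := by omega
      have h2' : i.toNat < (mySplit [] l).length := by omega
      have := join_take_prefix (mySplit [] l) i.toNat h1' h2'
      have hjoin : PySem.Chars.join ['.'] (mySplit [] l) = l := by
        simpa using join_mySplit l []
      rwa [hjoin] at this
  · rintro (rfl | ⟨b, hb⟩)
    · refine ⟨((mySplit [] k).length : Int), ?_, ?_⟩
      · rw [mem_pyRange_down]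
        have := mySplit_length_pos ([] : List Char) k
        omega
      · rw [PySem.List.slice_to _ (by positivity)]
        simp only [Int.toNat_natCast, List.take_length]
        simpa using (join_mySplit k []).symm
    · have hl : l = k ++ '.' :: b := by simpa using hb.symm
      subst hl
      have hsplit : mySplit [] (k ++ '.' :: b) = mySplit [] k ++ mySplit [] b :=
        mySplit_append k [] b
      have hlen : (mySplit [] (k ++ '.' :: b)).length
          = (mySplit [] k).length + (mySplit [] b).length := by
        rw [hsplit, List.length_append]
      refine ⟨((mySplit [] k).length : Int), ?_, ?_⟩
      · rw [mem_pyRange_down]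
        have h1 := mySplit_length_pos ([] : List Char) k
        have h2 := mySplit_length_pos ([] : List Char) b
        omega
      · rw [PySem.List.slice_to _ (by positivity)]
        simp only [Int.toNat_natCast]
        rw [hsplit, List.take_left]
        simpa using (join_mySplit k []).symm

theorem key_eq_ofList_iff (k : String) (c : List Char) : (k = String.ofList c) ↔ k.toList = c := by
  rw [← String.toList_inj, String.toList_ofList]

theorem prefix_dot_iff (x y : List Char) (h : x.length < y.length) :
    (y[x.length]? = some '.' ∧ x <+: y) ↔ x ++ ['.'] <+: y := by
  constructor
  · rintro ⟨hc, t, rfl⟩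
    rw [List.getElem?_append_right le_rfl] at hc
    simp only [Nat.sub_self] at hc
    cases t with
    | nil => simp at hc
    | cons c t' =>
      simp only [List.getElem?_cons_zero, Option.some_inj] at hc
      subst hc
      exact ⟨t', by simp⟩
  · rintro ⟨t, rfl⟩
    refine ⟨?_, ⟨'.' :: t, by simp⟩⟩
    rw [List.append_assoc, List.getElem?_append_right le_rfl]
    simp

theorem altBody_iff (p key : String) :
    pvAltBody p (PySem.Str.len p) key = true ↔
      (key = p ∨ key.toList ++ ['.'] <+: p.toList ∨ p.toList ++ ['.'] <+: key.toList) := by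
  unfold pvAltBody
  simp only [PySem.Str.len_eq]
  have hkp : (key = p) ↔ key.toList = p.toList := String.toList_inj.symm
  split_ifs with h1 h2
  · -- equal lengths
    have hlen : key.toList.length = p.toList.length := by exact_mod_cast h1
    simp only [beq_iff_eq]
    constructor
    · exact fun h => Or.inl h
    · rintro (h | h | h)
      · exact h
      · have := h.length_le
        simp only [List.length_append, List.length_cons, List.length_nil] at this; omega
      · have := h.length_le
        simp only [List.length_append, List.length_cons, List.length_nil] at this; omega
  · -- k < m : ancestor test
    have hlen : key.toList.length < p.toList.length := by exact_mod_cast h2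
    rw [PySem.Str.pyGet?_natCast, PySem.Str.startswith_eq]
    simp only [Bool.and_eq_true, beq_iff_eq, PySem.Chars.startswith_iff]
    rw [prefix_dot_iff _ _ hlen]
    constructor
    · exact fun h => Or.inr (Or.inl h)
    · rintro (h | h | h)
      · exact absurd (congrArg List.length (congrArg String.toList h)) (by omega)
      · exact h
      · have := h.length_le
        simp only [List.length_append, List.length_cons, List.length_nil] at this; omega
  · -- k > m : descendant test
    have hlen : p.toList.length < key.toList.length := by
      have h1' : key.toList.length ≠ p.toList.length := fun h => h1 (by exact_mod_cast h)
      have h2' : ¬ key.toList.length < p.toList.length := fun h => h2 (by exact_mod_cast h)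
      omega
    rw [PySem.Str.pyGet?_natCast, PySem.Str.startswith_eq]
    simp only [Bool.and_eq_true, beq_iff_eq, PySem.Chars.startswith_iff]
    rw [prefix_dot_iff _ _ hlen]
    constructor
    · exact fun h => Or.inr (Or.inr h)
    · rintro (h | h | h)
      · exact absurd (congrArg List.length (congrArg String.toList h)) (by omega)
      · have := h.length_le
        simp only [List.length_append, List.length_cons, List.length_nil] at this; omega
      · exact h

theorem altGo_eq_any (p : String) (m : Int) (keys : List String) :
    pvAltGo p m keys = keys.any (pvAltBody p m) := by
  induction keys with
  | nil => rfl
  | cons key rest ih => by_cases h : pvAltBody p m key = true <;> simp [pvAltGo, h, ih]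

-- ===== VERDICT (by name: the statement is the Claim_ definition above) =====
theorem has_permission_in_keys_py_spec : Claim_equal_has_permission_in_keys_py := by
  intro permission permission_keys _
  unfold Spec_has_permission_in_keys_py
  by_cases hp : permission = ""
  · simp [has_permission_in_keys_py, has_permission_in_keys_py_alt, hp]
  · rw [Bool.eq_iff_iff]
    by_cases hk : permission_keys = []
    · simp [has_permission_in_keys_py, has_permission_in_keys_py_alt, hp, hk, pvAltGo]
    · simp only [has_permission_in_keys_py, has_permission_in_keys_py_alt, if_neg hp, if_neg hk,
        splitOn_eq_mySplit, altGo_eq_any, List.any_eq_true, altBody_iff]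
      constructor
      · intro h
        split_ifs at h with h1 h2
        · -- permission ∈ permission_keys
          rw [List.contains_iff_mem] at h1
          exact ⟨permission, h1, Or.inl rfl⟩
        · -- a parent candidate matched
          obtain ⟨i, hi, hcand⟩ := h2
          rw [List.contains_iff_mem] at hcand
          refine ⟨_, hcand, ?_⟩
          have hc : (String.ofList (PySem.Chars.join ['.']
              (PySem.List.slice (mySplit [] permission.toList) none (some i)))).toList = permission.toList
              ∨ (String.ofList (PySem.Chars.join ['.']
              (PySem.List.slice (mySplit [] permission.toList) none (some i)))).toList ++ ['.'] <+: permission.toList := by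
            rw [String.toList_ofList]
            exact (candidate_char permission.toList _).mp ⟨i, hi, rfl⟩
          rcases hc with hc | hc
          · exact Or.inl (String.toList_inj.mp hc)
          · exact Or.inr (Or.inl hc)
        · -- a child matched
          rw [List.any_eq_true] at h
          obtain ⟨key, hkey, hs⟩ := h
          refine ⟨key, hkey, Or.inr (Or.inr ?_)⟩
          rw [PySem.Str.startswith_eq, String.toList_append] at hs
          rw [PySem.Chars.startswith_iff] at hs
          simpa using hs
      · rintro ⟨key, hkey, (heq | hanc | hdesc)⟩
        · subst heq
          rw [if_pos (List.contains_iff_mem.mpr hkey)]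
        · -- key is a strict ancestor: the candidate loop finds it
          split_ifs with h1 h2
          · rfl
          · rfl
          · exfalso; apply h2
            obtain ⟨i, hi, hjoin⟩ :=
              (candidate_char permission.toList key.toList).mpr (Or.inr hanc)
            refine ⟨i, hi, ?_⟩
            rw [List.contains_iff_mem]
            rw [← (key_eq_ofList_iff key _).mpr hjoin]
            exact hkey
        · -- key is a descendant: the final any finds it
          split_ifs with h1 h2
          · rfl
          · rfl
          · rw [List.any_eq_true]
            refine ⟨key, hkey, ?_⟩
            rw [PySem.Str.startswith_eq, String.toList_append, PySem.Chars.startswith_iff]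
            simpa using hdesc
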